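-- pv_equiv track=rewrite | github.com/AresDan/Data-Science | Hadoop. mrjob/help/mr_summary_stats.py | reduce_sum_values
-- ===== SOURCE A (Python) =====
-- def reduce_sum_values(label, values):
--
--     sum_of_el = 0
--     sum_of_elem = 0
--     sum_of_elem_sq = 0
--
--     for elem in values:
--         sum_of_el += elem[0]
--         sum_of_elem += elem[1]
--         sum_of_elem_sq += elem[2]
--
--     yield label, [sum_of_el, sum_of_elem, sum_of_elem_sq]
-- ===== SOURCE B (Python) =====
-- def reduce_sum_values(label, values):
--     data = list(values)
--
--     def colsum(lo, hi):
--         # divide-and-conquer column sums over data[lo:hi]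
--         if lo == hi:
--             return (0, 0, 0)
--         if hi - lo == 1:
--             r = data[lo]
--             return (r[0], r[1], r[2])
--         mid = (lo + hi) // 2
--         a = colsum(lo, mid)
--         b = colsum(mid, hi)
--         return (a[0] + b[0], a[1] + b[1], a[2] + b[2])
--
--     s = colsum(0, len(data))
--     yield label, [s[0], s[1], s[2]]
-- ===== Notes on version B (the rewrite author's own statement) =====
-- stated objective: alternative
-- what changed: Replaces the single linear loop with three interleaved accumulators by a recursive divide-and-conquer that splits the materialized list in half, computes column-sum triples of each half, and combines them componentwise (correct because integer addition is associative/commutative).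
import Mathlib
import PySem

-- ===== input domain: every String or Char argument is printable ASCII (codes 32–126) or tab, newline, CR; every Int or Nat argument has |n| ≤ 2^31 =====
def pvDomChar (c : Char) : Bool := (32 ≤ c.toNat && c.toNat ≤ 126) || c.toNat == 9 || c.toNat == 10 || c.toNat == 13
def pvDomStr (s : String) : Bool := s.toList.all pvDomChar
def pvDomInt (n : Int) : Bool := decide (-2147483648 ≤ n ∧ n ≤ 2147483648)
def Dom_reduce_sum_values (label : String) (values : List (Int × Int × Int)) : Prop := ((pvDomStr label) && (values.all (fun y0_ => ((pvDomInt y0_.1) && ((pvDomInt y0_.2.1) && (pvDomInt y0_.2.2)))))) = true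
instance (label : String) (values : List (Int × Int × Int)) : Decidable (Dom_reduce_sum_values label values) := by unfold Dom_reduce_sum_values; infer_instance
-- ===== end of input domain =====

-- B replaces A's single interleaved three-accumulator loop by a divide-and-conquer
-- over the materialized list (objective: alternative, same O(n) cost).

-- ===== PORT A =====
-- interleaved accumulation: one fold carrying (sum_of_el, sum_of_elem, sum_of_elem_sq)
def reduce_sum_values (label : String) (values : List (Int × Int × Int)) : List (String × List Int) :=
  let acc := values.foldl
    (fun (s : Int × Int × Int) elem => (s.1 + elem.1, s.2.1 + elem.2.1, s.2.2 + elem.2.2))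
    (0, 0, 0)
  [(label, [acc.1, acc.2.1, acc.2.2])]

-- ===== PORT B =====
-- Source B's colsum(lo, hi) on data[lo:hi]: here the sublist itself is the argument,
-- and the split at mid = (lo+hi)//2 corresponds to take/drop at length/2.
def pvColSum (xs : List (Int × Int × Int)) : Int × Int × Int :=
  match xs with
  | [] => (0, 0, 0)
  | [r] => (r.1, r.2.1, r.2.2)
  | x :: y :: t =>
    let m := (x :: y :: t).length / 2
    let a := pvColSum ((x :: y :: t).take m)
    let b := pvColSum ((x :: y :: t).drop m)
    (a.1 + b.1, a.2.1 + b.2.1, a.2.2 + b.2.2)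
termination_by xs.length
decreasing_by
  · simp [List.length_take]; omega
  · simp; omega

def reduce_sum_values_alt (label : String) (values : List (Int × Int × Int)) : List (String × List Int) :=
  let data := values
  let s := pvColSum data
  [(label, [s.1, s.2.1, s.2.2])]

-- ===== PRECONDITION & SPEC =====
def Spec_reduce_sum_values (label : String) (values : List (Int × Int × Int)) (out : List (String × List Int)) : Prop := out = reduce_sum_values_alt label values
instance (label : String) (values : List (Int × Int × Int)) (out : List (String × List Int)) : Decidable (Spec_reduce_sum_values label values out) := by unfold Spec_reduce_sum_values; infer_instance

-- ===== CLAIM (what is proved, stated in full; the proofs are below) =====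
def Claim_equal_reduce_sum_values : Prop := ∀ (label : String) (values : List (Int × Int × Int)), Dom_reduce_sum_values label values → Spec_reduce_sum_values label values (reduce_sum_values label values)

-- ===== LEMMAS AND PROOFS =====

lemma fold3_eq (values : List (Int × Int × Int)) (a b c : Int) :
    values.foldl (fun (s : Int × Int × Int) elem => (s.1 + elem.1, s.2.1 + elem.2.1, s.2.2 + elem.2.2)) (a, b, c)
      = (a + (values.map (fun r => r.1)).sum,
         b + (values.map (fun r => r.2.1)).sum,
         c + (values.map (fun r => r.2.2)).sum) := by
  induction values generalizing a b c with
  | nil => simp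
  | cons h t ih => simp [List.foldl, ih, Int.add_assoc]

lemma colSum_eq (xs : List (Int × Int × Int)) :
    pvColSum xs = ((xs.map (fun r => r.1)).sum,
                   (xs.map (fun r => r.2.1)).sum,
                   (xs.map (fun r => r.2.2)).sum) := by
  induction hn : xs.length using Nat.strong_induction_on generalizing xs with
  | _ n ih =>
    match xs with
    | [] => simp [pvColSum]
    | [r] => simp [pvColSum]
    | x :: y :: t =>
      rw [pvColSum]
      have hm : (x :: y :: t).length / 2 < (x :: y :: t).length := by simp; omega
      have ht : ((x :: y :: t).take ((x :: y :: t).length / 2)).length < n := by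
        subst hn; simp [List.length_take]; omega
      have hd : ((x :: y :: t).drop ((x :: y :: t).length / 2)).length < n := by
        subst hn; simp; omega
      rw [ih _ ht _ rfl, ih _ hd _ rfl]
      have hsplit := List.take_append_drop ((x :: y :: t).length / 2) (x :: y :: t)
      conv_rhs => rw [← hsplit]
      simp

-- ===== VERDICT (by name: the statement is the Claim_ definition above) =====
theorem reduce_sum_values_spec : Claim_equal_reduce_sum_values := by
  intro label values _
  unfold Spec_reduce_sum_values reduce_sum_values reduce_sum_values_alt
  simp [fold3_eq, colSum_eq]
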